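-- pv_equiv track=rewrite | github.com/Matheussoranco/M.I.A_Multimodal_Inteligent_Assistant | src/mia/web/web_agent.py | _generate_content_summary
-- ===== SOURCE A (Python) =====
-- from typing import Any, Dict, Iterable, List, Optional
--
-- def _generate_content_summary(content: Dict[str, Any], query: str) -> Optional[str]:
--     """Generate a summary of scraped content related to the query."""
--     if not content or "text" not in content:
--         return None
--
--     text = content["text"]
--     if len(text) < 100:
--         return text  # Too short to summarize
--
--     # Simple extractive summarization
--     sentences = [s.strip() for s in text.split('.') if s.strip()]
--
--     # Score sentences based on query terms
--     query_terms = set(query.lower().split())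
--     scored_sentences = []
--
--     for sentence in sentences:
--         words = set(sentence.lower().split())
--         score = len(words.intersection(query_terms))
--         scored_sentences.append((score, sentence))
--
--     # Select top sentences
--     scored_sentences.sort(reverse=True, key=lambda x: x[0])
--     top_sentences = [s[1] for s in scored_sentences[:3] if s[0] > 0]
--
--     if top_sentences:
--         return '. '.join(top_sentences) + '.'
--
--     # Fallback: return first few sentences
--     return '. '.join(sentences[:2]) + '.' if sentences else None
-- ===== SOURCE B (Python) =====
-- def _insert_desc(item, top):
--     """Insert item into a score-descending list, after existing equal scores."""
--     for i, y in enumerate(top):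
--         if y[0] < item[0]:
--             return top[:i] + [item] + top[i:]
--     return top + [item]
--
--
-- def _generate_content_summary(content, query):
--     """Generate a summary of scraped content related to the query."""
--     if not content or "text" not in content:
--         return None
--
--     text = content["text"]
--     if len(text) < 100:
--         return text  # Too short to summarize
--
--     query_terms = set(query.lower().split())
--
--     # One fused pass: collect sentences and maintain only the best <=3
--     # (score, sentence) by bounded insertion -- no full sort.
--     sentences = []
--     top = []
--     for raw in text.split('.'):
--         s = raw.strip()
--         if not s:
--             continue
--         sentences.append(s)
--         score = len(set(s.lower().split()) & query_terms)
--         top = _insert_desc((score, s), top)[:3]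
--
--     top_sentences = [s for sc, s in top if sc > 0]
--     if top_sentences:
--         return '. '.join(top_sentences) + '.'
--
--     return '. '.join(sentences[:2]) + '.' if sentences else None
-- ===== Notes on version B (the rewrite author's own statement) =====
-- stated objective: alternative
-- what changed: Replaces A's build-full-scored-list + stable reverse sort + [:3] slice with a single fused pass over the sentences that maintains only the best ≤3 (score, sentence) pairs by bounded insertion (no full sort, no separate scored list).
import Mathlib
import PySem

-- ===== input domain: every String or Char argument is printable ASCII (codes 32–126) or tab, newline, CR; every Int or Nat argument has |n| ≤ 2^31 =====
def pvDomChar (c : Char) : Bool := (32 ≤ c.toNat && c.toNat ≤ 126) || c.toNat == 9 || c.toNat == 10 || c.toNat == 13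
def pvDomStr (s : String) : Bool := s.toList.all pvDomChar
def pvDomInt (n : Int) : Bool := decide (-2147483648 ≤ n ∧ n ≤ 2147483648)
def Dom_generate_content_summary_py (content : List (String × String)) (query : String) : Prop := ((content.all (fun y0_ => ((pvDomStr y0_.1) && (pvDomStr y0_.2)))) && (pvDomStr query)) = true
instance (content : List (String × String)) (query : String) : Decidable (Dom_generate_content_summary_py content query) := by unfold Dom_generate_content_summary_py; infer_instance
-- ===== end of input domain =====

-- B replaces A's build-score-list + full reverse sort + slice with one fused pass that keeps
-- only the best ≤3 (score, sentence) pairs by bounded insertion (objective: alternative).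

-- ===== PORT A =====
-- core of A after the dict guard: len check, split/strip, score loop, full stable
-- reverse sort, top-3 slice, join (text.split('.') with the non-empty literal '.'
-- is always `some`, hence the `.getD []`; xs[:3] / xs[:2] are PySem.List.slice)
def pvCoreA (text query : String) : Option String :=
  if PySem.Str.len text < 100 then some text
  else
    let sentences := (((PySem.Str.split? text ".").getD []).filter
        (fun s => decide (PySem.Str.strip s ≠ ""))).map PySem.Str.strip
    let query_terms : PySem.Set String := PySem.Set.ofList (PySem.Str.split₀ (PySem.Str.lower query))
    let scored := sentences.foldl (fun acc sentence =>
        let words : PySem.Set String := PySem.Set.ofList (PySem.Str.split₀ (PySem.Str.lower sentence))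
        let score : Int := PySem.Set.len (PySem.Set.inter words query_terms)
        acc ++ [(score, sentence)]) []
    let sortedScored := PySem.List.sorted scored Prod.fst true
    let top_sentences := ((PySem.List.slice sortedScored none (some 3)).filter
        (fun p => decide ((0:Int) < p.1))).map Prod.snd
    if top_sentences ≠ [] then some (PySem.Str.join ". " top_sentences ++ ".")
    else if sentences ≠ [] then
      some (PySem.Str.join ". " (PySem.List.slice sentences none (some 2)) ++ ".")
    else none

def generate_content_summary_py (content : List (String × String)) (query : String) : Option String :=
  if content.isEmpty || !(PySem.Dict.contains ⟨content⟩ "text") then none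
  else
    match PySem.Dict.get? (⟨content⟩ : PySem.Dict String String) "text" with
    | none => none   -- unreachable: guarded by `contains`
    | some text => pvCoreA text query

-- ===== PORT B =====
-- port of Source B's _insert_desc: insert before the first strictly smaller score
def pvInsertDesc (item : Int × String) : List (Int × String) → List (Int × String)
  | [] => [item]
  | y :: ys => if y.1 < item.1 then item :: y :: ys else y :: pvInsertDesc item ys

-- core of B after the dict guard: one fused pass collecting the sentences and a
-- bounded (≤3) score-descending insertion list; same split?/slice remarks as in A
def pvCoreB (text query : String) : Option String :=
  if PySem.Str.len text < 100 then some text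
  else
    let query_terms : PySem.Set String := PySem.Set.ofList (PySem.Str.split₀ (PySem.Str.lower query))
    let st := ((PySem.Str.split? text ".").getD []).foldl
      (fun (st : List String × List (Int × String)) raw =>
        let s := PySem.Str.strip raw
        if s = "" then st
        else
          let score : Int := PySem.Set.len (PySem.Set.inter
            (PySem.Set.ofList (PySem.Str.split₀ (PySem.Str.lower s))) query_terms)
          (st.1 ++ [s], PySem.List.slice (pvInsertDesc (score, s) st.2) none (some 3)))
      ([], [])
    let top_sentences := (st.2.filter (fun p => decide ((0:Int) < p.1))).map Prod.snd
    if top_sentences ≠ [] then some (PySem.Str.join ". " top_sentences ++ ".")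
    else if st.1 ≠ [] then
      some (PySem.Str.join ". " (PySem.List.slice st.1 none (some 2)) ++ ".")
    else none

def generate_content_summary_py_alt (content : List (String × String)) (query : String) : Option String :=
  if content.isEmpty || !(PySem.Dict.contains ⟨content⟩ "text") then none
  else
    match PySem.Dict.get? (⟨content⟩ : PySem.Dict String String) "text" with
    | none => none   -- unreachable: guarded by `contains`
    | some text => pvCoreB text query

-- ===== PRECONDITION & SPEC =====
def Spec_generate_content_summary_py (content : List (String × String)) (query : String) (out : Option String) : Prop := out = generate_content_summary_py_alt content query
instance (content : List (String × String)) (query : String) (out : Option String) : Decidable (Spec_generate_content_summary_py content query out) := by unfold Spec_generate_content_summary_py; infer_instance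

-- ===== CLAIM (what is proved, stated in full; the proofs are below) =====
def Claim_equal_generate_content_summary_py : Prop := ∀ (content : List (String × String)) (query : String), Dom_generate_content_summary_py content query → Spec_generate_content_summary_py content query (generate_content_summary_py content query)

-- ===== LEMMAS AND PROOFS =====

lemma pv_take_cons_take {α : Type} (y : α) (ys : List α) (n : Nat) :
    (y :: ys.take n).take n = (y :: ys).take n := by
  cases n with
  | zero => rfl
  | succ m => simp [List.take_take]

lemma pv_insert_take (x : Int × String) (l : List (Int × String)) (n : Nat) :
    (pvInsertDesc x (l.take n)).take n = (pvInsertDesc x l).take n := by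
  induction l generalizing n with
  | nil => simp
  | cons y ys ih =>
    cases n with
    | zero => rfl
    | succ m =>
      simp only [List.take_succ_cons, pvInsertDesc]
      by_cases h : y.1 < x.1
      · simp only [if_pos h, List.take_succ_cons]
        rw [pv_take_cons_take]
      · simp only [if_neg h, List.take_succ_cons, ih]

lemma pv_slice3 {α : Type} (xs : List α) :
    PySem.List.slice xs none (some 3) = xs.take 3 := by
  simpa using PySem.List.slice_to_natCast xs 3

-- B's fused loop (slice already normalised to take) = (collected sentences, take 3 of the full insertion fold)
lemma pv_fold_B (g : String → Int) (raws : List String) (ss : List String)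
    (tt : List (Int × String)) :
    raws.foldl
      (fun (st : List String × List (Int × String)) raw =>
        if PySem.Str.strip raw = "" then st
        else (st.1 ++ [PySem.Str.strip raw],
              (pvInsertDesc (g (PySem.Str.strip raw), PySem.Str.strip raw) st.2).take 3))
      (ss, tt.take 3)
    = (ss ++ ((raws.filter (fun r => decide (PySem.Str.strip r ≠ ""))).map PySem.Str.strip),
       ((((raws.filter (fun r => decide (PySem.Str.strip r ≠ ""))).map PySem.Str.strip).foldl
          (fun t s => pvInsertDesc (g s, s) t) tt).take 3)) := by
  induction raws generalizing ss tt with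
  | nil => simp
  | cons raw rest ih =>
    simp only [List.foldl_cons, List.filter_cons]
    by_cases h : PySem.Str.strip raw = ""
    · simp [h, ih]
    · simp only [if_neg h]
      rw [pv_insert_take,
        ih (ss ++ [PySem.Str.strip raw]) (pvInsertDesc (g (PySem.Str.strip raw), PySem.Str.strip raw) tt)]
      simp [h]

lemma pv_insertDesc_eq_insertBy (x : Int × String) (l : List (Int × String)) :
    pvInsertDesc x l = PySem.List.insertBy (fun a b => decide (b.1 < a.1)) x l := by
  induction l with
  | nil => rfl
  | cons y ys ih => simp only [pvInsertDesc, PySem.List.insertBy, ih]; split <;> simp_all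

lemma pv_core_eq (text query : String) : pvCoreA text query = pvCoreB text query := by
  unfold pvCoreA pvCoreB
  by_cases hlen : PySem.Str.len text < 100
  · simp only [if_pos hlen]
  · simp only [if_neg hlen, pv_slice3]
    have hB := pv_fold_B
      (fun s => PySem.Set.len (PySem.Set.inter
        (PySem.Set.ofList (PySem.Str.split₀ (PySem.Str.lower s)))
        (PySem.Set.ofList (PySem.Str.split₀ (PySem.Str.lower query)))))
      ((PySem.Str.split? text ".").getD []) [] []
    simp only [List.take_nil, List.nil_append] at hB
    rw [hB]
    have hscored := PySem.List.foldl_append_singleton_eq_map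
      (fun s => ((PySem.Set.len (PySem.Set.inter
        (PySem.Set.ofList (PySem.Str.split₀ (PySem.Str.lower s)))
        (PySem.Set.ofList (PySem.Str.split₀ (PySem.Str.lower query)))) : Int), s))
      ((((PySem.Str.split? text ".").getD []).filter
        (fun r => decide (PySem.Str.strip r ≠ ""))).map PySem.Str.strip) []
    simp only [List.nil_append] at hscored
    rw [hscored, PySem.List.sorted_rev_eq_foldl_insertBy, List.foldl_map]
    have hfold := PySem.List.foldl_congr_mem
      (f := fun acc (x : String) => PySem.List.insertBy (fun (a b : Int × String) => decide (b.1 < a.1))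
        ((PySem.Set.len (PySem.Set.inter
          (PySem.Set.ofList (PySem.Str.split₀ (PySem.Str.lower x)))
          (PySem.Set.ofList (PySem.Str.split₀ (PySem.Str.lower query)))) : Int), x) acc)
      (g := fun acc (x : String) => pvInsertDesc
        ((PySem.Set.len (PySem.Set.inter
          (PySem.Set.ofList (PySem.Str.split₀ (PySem.Str.lower x)))
          (PySem.Set.ofList (PySem.Str.split₀ (PySem.Str.lower query)))) : Int), x) acc)
      (l := (((PySem.Str.split? text ".").getD []).filter
        (fun r => decide (PySem.Str.strip r ≠ ""))).map PySem.Str.strip)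
      (init := [])
      (by intro acc x _; simp only [pv_insertDesc_eq_insertBy])
    rw [hfold]

-- ===== VERDICT (by name: the statement is the Claim_ definition above) =====
theorem generate_content_summary_py_spec : Claim_equal_generate_content_summary_py := by
  intro content query _
  unfold Spec_generate_content_summary_py generate_content_summary_py generate_content_summary_py_alt
  by_cases hgd : (content.isEmpty || !(PySem.Dict.contains ⟨content⟩ "text")) = true
  · rw [if_pos hgd, if_pos hgd]
  · rw [if_neg hgd, if_neg hgd]
    cases hget : PySem.Dict.get? (⟨content⟩ : PySem.Dict String String) "text" with
    | none => rfl
    | some text => exact pv_core_eq text query
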